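-- pv_equiv track=rewrite | github.com/GareemaRanjan/coding_practice | capital/Question_3.py | process_logs
-- ===== SOURCE A (Python) =====
-- def process_logs(logs):
--     from collections import defaultdict
--     res = []
--     inv = defaultdict(lambda: defaultdict(int))
--     for log in logs:
--         if not log: continue
--         op = log[0]
--         if op == 'supply':
--             _, r, c, p = log
--             inv[r][int(p)] += int(c)
--         elif op == 'upgrade':
--             _, r, c, op, np = log
--             c, op, np = int(c), int(op), int(np)
--             avail = inv[r].get(op, 0)
--             to_upgrade = min(c, avail)
--             if to_upgrade:
--                 inv[r][op] -= to_upgrade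
--                 if inv[r][op] == 0:
--                     del inv[r][op]
--                 inv[r][np] += to_upgrade
--         elif op == 'sell':
--             _, r, c = log
--             c = int(c)
--             revenue = 0
--             prices = sorted(inv[r])
--             for p in prices:
--                 if c == 0: break
--                 qty = min(c, inv[r][p])
--                 revenue += qty * p
--                 inv[r][p] -= qty
--                 c -= qty
--                 if inv[r][p] == 0:
--                     del inv[r][p]
--             res.append(revenue)
--     return res
--
-- logs = [
--     ["supply", "robot1", "2", "100"],
--     ["supply", "robot2", "3", "60"],
--     ["sell", "robot1", "1"],
--     ["upgrade", "robot2", "1", "60", "100"],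
--     ["sell", "robot2", "1"],
--     ["sell", "robot2", "1"],
--     ["sell", "robot2", "1"]
-- ]
-- ===== SOURCE B (Python) =====
-- # Same task, different structure: one flat dict robot -> price-sorted assoc list
-- # maintained incrementally, so a sell scans an already-sorted list instead of
-- # re-sorting a dict's keys on every sell.
--
-- def _get(lst, p):
--     for x, q in lst:
--         if x == p:
--             return q
--     return 0
--
-- def _add(lst, p, c):
--     # add c at price p, inserting at the sorted position; keep the entry even if 0
--     out, i = [], 0
--     while i < len(lst) and lst[i][0] < p:
--         out.append(lst[i]); i += 1
--     if i < len(lst) and lst[i][0] == p: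
--         out.append((p, lst[i][1] + c)); i += 1
--     else:
--         out.append((p, c))
--     out.extend(lst[i:])
--     return out
--
-- def _sub(lst, p, t):
--     # subtract t at price p (creating the entry if absent); drop it when it hits 0
--     out, i = [], 0
--     while i < len(lst) and lst[i][0] < p:
--         out.append(lst[i]); i += 1
--     if i < len(lst) and lst[i][0] == p:
--         if lst[i][1] != t:
--             out.append((p, lst[i][1] - t))
--         i += 1
--     else:
--         out.append((p, -t))
--     out.extend(lst[i:])
--     return out
--
-- def _sell(lst, c):
--     revenue, out = 0, []
--     for i in range(len(lst)):
--         if c == 0: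
--             out.extend(lst[i:])
--             break
--         p, q = lst[i]
--         qty = min(c, q)
--         revenue += qty * p
--         c -= qty
--         if q != qty:
--             out.append((p, q - qty))
--     return revenue, out
--
-- def process_logs(logs):
--     res = []
--     inv = {}
--     for log in logs:
--         if not log:
--             continue
--         op = log[0]
--         if op == 'supply':
--             _, r, c, p = log
--             inv[r] = _add(inv.get(r, []), int(p), int(c))
--         elif op == 'upgrade':
--             _, r, c, old, new = log
--             c, old, new = int(c), int(old), int(new)
--             lst = inv.get(r, [])
--             t = min(c, _get(lst, old))
--             if t:
--                 lst = _add(_sub(lst, old, t), new, t)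
--             inv[r] = lst
--         elif op == 'sell':
--             _, r, c = log
--             revenue, lst = _sell(inv.get(r, []), int(c))
--             res.append(revenue)
--             inv[r] = lst
--     return res
-- ===== Notes on version B (the rewrite author's own statement) =====
-- stated objective: alternative
-- what changed: Replaces A's per-robot dict of prices that is re-sorted on every sell by a per-robot price-sorted association list maintained incrementally (sorted insert on supply/upgrade, linear front scan on sell), so no sorting ever happens during a sell.
import Mathlib
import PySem

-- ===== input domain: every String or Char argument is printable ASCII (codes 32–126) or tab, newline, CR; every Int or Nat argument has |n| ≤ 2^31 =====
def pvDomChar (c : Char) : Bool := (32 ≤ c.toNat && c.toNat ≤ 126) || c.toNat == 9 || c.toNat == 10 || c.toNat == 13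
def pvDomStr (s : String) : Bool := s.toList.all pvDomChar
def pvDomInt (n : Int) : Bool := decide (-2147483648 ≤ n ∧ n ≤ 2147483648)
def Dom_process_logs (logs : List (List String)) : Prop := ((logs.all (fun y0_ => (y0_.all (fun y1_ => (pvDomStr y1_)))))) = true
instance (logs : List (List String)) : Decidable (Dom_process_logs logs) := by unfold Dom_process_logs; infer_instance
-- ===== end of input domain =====

-- B keeps one price-sorted association list per robot (updated incrementally) instead of
-- A's dict of prices re-sorted on every sell — no sorting at sell time; equal return
-- value proved on Pre_ (the inputs A accepts).

-- int(s); Pre_process_logs excludes inputs on which int() raises, so the default is never taken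
def pvInt (s : String) : Int := (PySem.Int.ofStr? s).getD 0

-- ===== PORT A =====
def aSellLoop : List Int → Int → Int → PySem.Dict Int Int → Int × PySem.Dict Int Int
  | [], rev, _, d => (rev, d)
  | p :: ps, rev, c, d =>
    if c = 0 then (rev, d)
    else
      let qty := min c (d.getD p 0)
      let rev := rev + qty * p
      let d := d.modify p 0 (· - qty)
      let c := c - qty
      let d := if d.getD p 0 = 0 then d.erase p else d
      aSellLoop ps rev c d

def aStep (st : List Int × PySem.Dict String (PySem.Dict Int Int)) (log : List String) :
    List Int × PySem.Dict String (PySem.Dict Int Int) :=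
  match log with
  | [] => st
  | op :: _ =>
    if op = "supply" then
      match log with
      | [_, r, c, p] =>
        (st.1, st.2.insert r ((st.2.getD r PySem.Dict.empty).modify (pvInt p) 0 (· + pvInt c)))
      | _ => st
    else if op = "upgrade" then
      match log with
      | [_, r, c, o, n] =>
        let cv := pvInt c
        let ov := pvInt o
        let nv := pvInt n
        let inner := st.2.getD r PySem.Dict.empty
        let avail := inner.getD ov 0
        let t := min cv avail
        if t ≠ 0 then
          let inner := inner.modify ov 0 (· - t)
          let inner := if inner.getD ov 0 = 0 then inner.erase ov else inner
          let inner := inner.modify nv 0 (· + t)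
          (st.1, st.2.insert r inner)
        else (st.1, st.2.insert r inner)
      | _ => st
    else if op = "sell" then
      match log with
      | [_, r, c] =>
        let inner := st.2.getD r PySem.Dict.empty
        let prices := PySem.List.sorted inner.keys (fun k => k)
        let out := aSellLoop prices 0 (pvInt c) inner
        (st.1 ++ [out.1], st.2.insert r out.2)
      | _ => st
    else st

def process_logs (logs : List (List String)) : List Int :=
  (logs.foldl aStep ([], PySem.Dict.empty)).1

-- ===== PORT B =====
def bGet : List (Int × Int) → Int → Int
  | [], _ => 0
  | (x, q) :: rest, p => if x = p then q else bGet rest p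

def bAdd : List (Int × Int) → Int → Int → List (Int × Int)
  | [], p, c => [(p, c)]
  | (x, q) :: rest, p, c =>
    if x < p then (x, q) :: bAdd rest p c
    else if x = p then (p, q + c) :: rest
    else (p, c) :: (x, q) :: rest

def bSub : List (Int × Int) → Int → Int → List (Int × Int)
  | [], p, t => [(p, -t)]
  | (x, q) :: rest, p, t =>
    if x < p then (x, q) :: bSub rest p t
    else if x = p then (if q = t then rest else (p, q - t) :: rest)
    else (p, -t) :: (x, q) :: rest

def bSellLoop : List (Int × Int) → Int → Int → List (Int × Int) → Int × List (Int × Int)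
  | [], _, rev, out => (rev, out)
  | (p, q) :: rest, c, rev, out =>
    if c = 0 then (rev, out ++ (p, q) :: rest)
    else
      let qty := min c q
      let rev := rev + qty * p
      let c := c - qty
      let out := if q = qty then out else out ++ [(p, q - qty)]
      bSellLoop rest c rev out

def bStep (st : List Int × PySem.Dict String (List (Int × Int))) (log : List String) :
    List Int × PySem.Dict String (List (Int × Int)) :=
  match log with
  | [] => st
  | op :: _ =>
    if op = "supply" then
      match log with
      | [_, r, c, p] =>
        (st.1, st.2.insert r (bAdd (st.2.getD r []) (pvInt p) (pvInt c)))
      | _ => st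
    else if op = "upgrade" then
      match log with
      | [_, r, c, o, n] =>
        let cv := pvInt c
        let ov := pvInt o
        let nv := pvInt n
        let lst := st.2.getD r []
        let t := min cv (bGet lst ov)
        (st.1, st.2.insert r (if t ≠ 0 then bAdd (bSub lst ov t) nv t else lst))
      | _ => st
    else if op = "sell" then
      match log with
      | [_, r, c] =>
        let out := bSellLoop (st.2.getD r []) (pvInt c) 0 []
        (st.1 ++ [out.1], st.2.insert r out.2)
      | _ => st
    else st

def process_logs_alt (logs : List (List String)) : List Int :=
  (logs.foldl bStep ([], PySem.Dict.empty)).1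

-- ===== PRECONDITION & SPEC =====
def pvOkInt (s : String) : Bool := (PySem.Int.ofStr? s).isSome

-- a recognised op must have the arity A unpacks and int()-parsable numeric fields, else A raises
def pvOkLog : List String → Bool
  | [] => true
  | op :: rest =>
    if op = "supply" then
      match rest with
      | [_, c, p] => pvOkInt c && pvOkInt p
      | _ => false
    else if op = "upgrade" then
      match rest with
      | [_, c, o, n] => pvOkInt c && pvOkInt o && pvOkInt n
      | _ => false
    else if op = "sell" then
      match rest with
      | [_, c] => pvOkInt c
      | _ => false
    else true

-- Pre_ excludes exactly the logs on which A raises (ValueError on unpacking or int())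
def Pre_process_logs (logs : List (List String)) : Prop := logs.all pvOkLog = true
instance (logs : List (List String)) : Decidable (Pre_process_logs logs) := by
  unfold Pre_process_logs; infer_instance

def pvWitness_process_logs : List (List String) :=
  [["supply", "robot1", "2", "100"], ["supply", "robot2", "3", "60"], ["sell", "robot1", "1"],
   ["upgrade", "robot2", "1", "60", "100"], ["sell", "robot2", "1"], ["sell", "robot2", "1"]]

def Spec_process_logs (logs : List (List String)) (out : List Int) : Prop := out = process_logs_alt logs
instance (logs : List (List String)) (out : List Int) : Decidable (Spec_process_logs logs out) := by
  unfold Spec_process_logs; infer_instance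

-- ===== CLAIM (what is proved, stated in full; the proofs are below) =====
def Claim_equal_process_logs : Prop := ∀ (logs : List (List String)), Dom_process_logs logs → Pre_process_logs logs → Spec_process_logs logs (process_logs logs)

-- ===== LEMMAS AND PROOFS =====

-- the per-robot simulation invariant: B's list carries exactly the key/value content of A's
-- inner dict, with strictly increasing prices
def DInv (d : PySem.Dict Int Int) (L : List (Int × Int)) : Prop :=
  d.keys.Perm (L.map Prod.fst) ∧ (∀ e ∈ L, d.getD e.1 0 = e.2) ∧
    (L.map Prod.fst).Pairwise (· < ·)

def SInv (A : PySem.Dict String (PySem.Dict Int Int))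
    (B : PySem.Dict String (List (Int × Int))) : Prop :=
  ∀ r, DInv (A.getD r PySem.Dict.empty) (B.getD r [])

theorem DInv_empty : DInv PySem.Dict.empty [] :=
  ⟨by simp [PySem.Dict.keys, PySem.Dict.empty], by simp, by simp⟩

theorem keys_erase_eq {ν : Type} (d : PySem.Dict Int ν) (k : Int) :
    (d.erase k).keys = d.keys.filter (fun x => !(x == k)) := by
  simp only [PySem.Dict.erase, PySem.Dict.keys]
  induction d.items with
  | nil => rfl
  | cons h t ih =>
    by_cases hk : h.1 = k <;> simp [List.filter_cons, hk, ih]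

theorem find?_filter_ne {ν : Type} (t : List (Int × ν)) (k k' : Int) (h : k' ≠ k) :
    List.find? (fun p => p.1 == k') (t.filter (fun p => !(p.1 == k))) =
      List.find? (fun p => p.1 == k') t := by
  induction t with
  | nil => rfl
  | cons hd t ih =>
    by_cases hk : hd.1 = k
    · rw [List.filter_cons, if_neg (by simp [hk]), ih,
        List.find?_cons_of_neg (by simp [hk, h.symm])]
    · by_cases hk' : hd.1 = k'
      · rw [List.filter_cons, if_pos (by simp [hk]), List.find?_cons_of_pos (by simp [hk']),
          List.find?_cons_of_pos (by simp [hk'])]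
      · rw [List.filter_cons, if_pos (by simp [hk]), List.find?_cons_of_neg (by simp [hk']),
          List.find?_cons_of_neg (by simp [hk']), ih]

theorem get?_erase_of_ne {ν : Type} (d : PySem.Dict Int ν) (k k' : Int) (h : k' ≠ k) :
    (d.erase k).get? k' = d.get? k' := by
  simp only [PySem.Dict.erase, PySem.Dict.get?]
  exact congrArg _ (find?_filter_ne d.items k k' h)

theorem getD_erase_of_ne (d : PySem.Dict Int Int) (k k' : Int) (h : k' ≠ k) :
    (d.erase k).getD k' 0 = d.getD k' 0 := by
  simp [PySem.Dict.getD, get?_erase_of_ne d k k' h]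

theorem bGet_not_mem (L : List (Int × Int)) (p : Int) (h : p ∉ L.map Prod.fst) :
    bGet L p = 0 := by
  induction L with
  | nil => rfl
  | cons e t ih =>
    obtain ⟨x, q⟩ := e
    simp only [List.map_cons, List.mem_cons] at h
    push_neg at h
    have hxp : ¬ x = p := fun hh => h.1 hh.symm
    simp [bGet, hxp, ih h.2]

theorem bGet_of_mem (L : List (Int × Int)) (p q : Int)
    (hp : (L.map Prod.fst).Pairwise (· < ·)) (h : (p, q) ∈ L) : bGet L p = q := by
  induction L with
  | nil => simp at h
  | cons e t ih =>
    obtain ⟨y, w⟩ := e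
    simp only [List.map_cons] at hp
    by_cases hyp : y = p
    · subst hyp
      have ht : ∀ e ∈ t, e.1 ≠ y :=
        fun e he => ne_of_gt (List.rel_of_pairwise_cons hp (List.mem_map_of_mem he))
      rcases List.mem_cons.mp h with h1 | h1
      · have hwq : w = q := (Prod.ext_iff.mp h1.symm).2
        simp [bGet, hwq]
      · exact absurd rfl (ht _ h1)
    · have h1 : (p, q) ∈ t := by
        rcases List.mem_cons.mp h with h1 | h1
        · exact absurd (Prod.ext_iff.mp h1).1 (fun hh => hyp hh.symm)
        · exact h1
      simp [bGet, hyp, ih hp.of_cons h1]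

theorem getD_eq_bGet (d : PySem.Dict Int Int) (L : List (Int × Int)) (hI : DInv d L) (p : Int) :
    d.getD p 0 = bGet L p := by
  obtain ⟨hk, hv, hp⟩ := hI
  by_cases hm : p ∈ L.map Prod.fst
  · obtain ⟨⟨x, q⟩, he, hfst⟩ := List.mem_map.mp hm
    have hfst' : x = p := hfst
    subst hfst'
    rw [hv _ he, bGet_of_mem L x q hp he]
  · rw [bGet_not_mem L p hm]
    have hnk : p ∉ d.keys := fun h => hm (hk.mem_iff.mp h)
    have hge := (PySem.Dict.get?_eq_none_iff_not_mem_keys d p).mpr hnk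
    simp [PySem.Dict.getD, hge]

theorem mem_of_get (d : PySem.Dict Int Int) (L : List (Int × Int)) (hI : DInv d L) (p : Int)
    (hm : p ∈ L.map Prod.fst) : (p, d.getD p 0) ∈ L := by
  obtain ⟨⟨x, q⟩, he, hfst⟩ := List.mem_map.mp hm
  have hfst' : x = p := hfst
  subst hfst'
  rw [hI.2.1 _ he]
  exact he

-- bAdd on a fresh key: a sorted insertion
theorem bAdd_not_mem (L : List (Int × Int)) (p c : Int)
    (hp : (L.map Prod.fst).Pairwise (· < ·)) (h : p ∉ L.map Prod.fst) :
    (bAdd L p c).Perm ((p, c) :: L) ∧ ((bAdd L p c).map Prod.fst).Pairwise (· < ·) := by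
  induction L with
  | nil => exact ⟨List.Perm.refl _, by simp [bAdd]⟩
  | cons e t ih =>
    obtain ⟨x, q⟩ := e
    simp only [List.map_cons, List.mem_cons] at h
    push_neg at h
    have hne : ¬ x = p := fun hh => h.1 hh.symm
    simp only [List.map_cons] at hp
    by_cases hlt : x < p
    · obtain ⟨ihp, ihs⟩ := ih hp.of_cons h.2
      constructor
      · simpa [bAdd, hlt] using ((ihp.cons (x, q)).trans (List.Perm.swap _ _ _))
      · simp only [bAdd, if_pos hlt, List.map_cons]
        refine List.Pairwise.cons (fun y hy => ?_) ihs
        have hy' : y ∈ p :: t.map Prod.fst := by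
          have := (ihp.map Prod.fst).mem_iff.mp hy
          simpa using this
        rcases List.mem_cons.mp hy' with rfl | hyt
        · exact hlt
        · exact List.rel_of_pairwise_cons hp hyt
    · constructor
      · simp [bAdd, hlt, hne]
      · simp only [bAdd, if_neg hlt, if_neg hne, List.map_cons]
        refine List.Pairwise.cons (fun y hy => ?_) hp
        rcases List.mem_cons.mp hy with rfl | hyt
        · omega
        · have := List.rel_of_pairwise_cons hp hyt
          omega

-- bAdd on a present key: an in-place value update
theorem bAdd_mem (L : List (Int × Int)) (p c : Int)
    (hp : (L.map Prod.fst).Pairwise (· < ·)) (h : p ∈ L.map Prod.fst) :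
    bAdd L p c = L.map (fun e => if e.1 = p then (p, e.2 + c) else e) := by
  induction L with
  | nil => simp at h
  | cons e t ih =>
    obtain ⟨x, q⟩ := e
    simp only [List.map_cons] at hp
    by_cases hxp : x = p
    · subst hxp
      have ht : ∀ e ∈ t, ¬ e.1 = x := by
        intro e he
        have := List.rel_of_pairwise_cons hp (List.mem_map_of_mem he)
        omega
      have htt : List.map (fun e => if e.1 = x then (x, e.2 + c) else e) t = t := by
        rw [List.map_congr_left (fun e he => if_neg (ht e he))]
        simp
      simp [bAdd, htt]
    · simp only [List.map_cons, List.mem_cons] at h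
      have hmem : p ∈ t.map Prod.fst := h.resolve_left (fun hh => hxp hh.symm)
      have hlt : x < p := by
        obtain ⟨e, he, rfl⟩ := List.mem_map.mp hmem
        exact List.rel_of_pairwise_cons hp (List.mem_map_of_mem he)
      simp [bAdd, hlt, ih hp.of_cons hmem, hxp]

theorem map_fst_update (L : List (Int × Int)) (p c : Int) :
    (L.map (fun e => if e.1 = p then (p, e.2 + c) else e)).map Prod.fst = L.map Prod.fst := by
  rw [List.map_map]
  refine List.map_congr_left (fun e _ => ?_)
  by_cases hep : e.1 = p <;> simp [hep]

theorem DInv_add (d : PySem.Dict Int Int) (L : List (Int × Int)) (hI : DInv d L) (p c : Int) :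
    DInv (d.modify p 0 (· + c)) (bAdd L p c) := by
  obtain ⟨hk, hv, hp⟩ := hI
  have hkeys : (d.modify p 0 (· + c)).keys =
      if d.contains p then d.keys else d.keys ++ [p] := by
    rw [PySem.Dict.keys_modify]
    by_cases hc : d.contains p
    · rw [if_pos hc, PySem.Dict.keys_insert_of_contains _ _ hc]
    · rw [if_neg hc, PySem.Dict.keys_insert_of_not_contains _ _ (by simpa using hc)]
  by_cases hm : p ∈ L.map Prod.fst
  · have hc : d.contains p := (PySem.Dict.contains_iff_mem_keys d p).mpr (hk.mem_iff.mpr hm)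
    rw [bAdd_mem L p c hp hm]
    refine ⟨?_, ?_, ?_⟩
    · rw [hkeys, if_pos hc, map_fst_update]
      exact hk
    · intro e he
      obtain ⟨e0, he0, rfl⟩ := List.mem_map.mp he
      by_cases hep : e0.1 = p
      · rw [if_pos hep]
        simp only
        rw [PySem.Dict.getD_modify, if_pos rfl, ← hep, hv e0 he0]
      · rw [if_neg hep]
        rw [PySem.Dict.getD_modify, if_neg hep, hv e0 he0]
    · rw [map_fst_update]
      exact hp
  · have hc : ¬ d.contains p := by
      intro hc
      exact hm (hk.mem_iff.mp ((PySem.Dict.contains_iff_mem_keys d p).mp hc))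
    obtain ⟨hperm, hsorted⟩ := bAdd_not_mem L p c hp hm
    refine ⟨?_, ?_, hsorted⟩
    · rw [hkeys, if_neg (by simpa using hc)]
      refine ((hk.append (List.Perm.refl [p])).trans ?_).trans (hperm.map Prod.fst).symm
      simpa using (List.perm_append_comm (l₁ := L.map Prod.fst) (l₂ := [p]))
    · intro e he
      have hd0 : d.getD p 0 = 0 := by
        rw [getD_eq_bGet d L ⟨hk, hv, hp⟩ p, bGet_not_mem L p hm]
      rcases List.mem_cons.mp (hperm.mem_iff.mp he) with rfl | heL
      · simp [PySem.Dict.getD_modify, hd0]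
      · have hep : e.1 ≠ p := fun hh => hm (hh ▸ List.mem_map_of_mem heL)
        rw [PySem.Dict.getD_modify, if_neg hep, hv e heL]

-- bSub when no entry (p, t) exists is just a sorted add of -t
theorem bSub_eq_bAdd (L : List (Int × Int)) (p t : Int) (h : (p, t) ∉ L) :
    bSub L p t = bAdd L p (-t) := by
  induction L with
  | nil => rfl
  | cons e rest ih =>
    obtain ⟨x, q⟩ := e
    simp only [List.mem_cons] at h
    push_neg at h
    by_cases hlt : x < p
    · simp [bSub, bAdd, hlt, ih h.2]
    · by_cases hxp : x = p
      · subst hxp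
        have hqt : ¬ q = t := fun hh => h.1 (by rw [hh])
        simp [bSub, bAdd, hlt, hqt, sub_eq_add_neg]
      · simp [bSub, bAdd, hlt, hxp]

-- bSub when the entry (p, t) exists deletes it
theorem bSub_drop (L : List (Int × Int)) (p t : Int)
    (hp : (L.map Prod.fst).Pairwise (· < ·)) (h : (p, t) ∈ L) :
    bSub L p t = L.filter (fun e => !(e.1 == p)) := by
  induction L with
  | nil => simp at h
  | cons e rest ih =>
    obtain ⟨x, q⟩ := e
    simp only [List.map_cons] at hp
    by_cases hxp : x = p
    · subst hxp
      have hrest : ∀ e ∈ rest, ¬ e.1 = x := by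
        intro e he
        have := List.rel_of_pairwise_cons hp (List.mem_map_of_mem he)
        omega
      have hqt : q = t := by
        rcases List.mem_cons.mp h with h1 | h1
        · exact (Prod.ext_iff.mp h1.symm).2
        · exact absurd rfl (hrest _ h1)
      subst hqt
      have hfr : List.filter (fun e => !(e.1 == x)) rest = rest :=
        List.filter_eq_self.mpr (fun e he => by simp [hrest e he])
      simp [bSub, List.filter_cons, hfr]
    · have hm : (p, t) ∈ rest := by
        rcases List.mem_cons.mp h with h1 | h1
        · exact absurd (Prod.ext_iff.mp h1).1 (fun hh => hxp hh.symm)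
        · exact h1
      have hlt : x < p :=
        List.rel_of_pairwise_cons hp (List.mem_map_of_mem hm)
      simp [bSub, hlt, List.filter_cons, hxp, ih hp.of_cons hm]

theorem map_fst_filter_ne (L : List (Int × Int)) (p : Int) :
    (L.filter (fun e => !(e.1 == p))).map Prod.fst = (L.map Prod.fst).filter (fun x => !(x == p)) := by
  induction L with
  | nil => rfl
  | cons e rest ih => by_cases hep : e.1 = p <;> simp [List.filter_cons, hep, ih]

theorem DInv_sub (d : PySem.Dict Int Int) (L : List (Int × Int)) (hI : DInv d L) (p t : Int)
    (ht : t ≠ 0) :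
    DInv (let d1 := d.modify p 0 (· - t);
         if d1.getD p 0 = 0 then d1.erase p else d1) (bSub L p t) := by
  have hgd : d.getD p 0 = bGet L p := getD_eq_bGet d L hI p
  have hself : (d.modify p 0 (· - t)).getD p 0 = d.getD p 0 - t := by
    rw [PySem.Dict.getD_modify, if_pos rfl]
  by_cases hmem : (p, t) ∈ L
  · -- the entry becomes 0: A erases the key, B drops the entry
    obtain ⟨hk, hv, hp⟩ := hI
    have hvt : d.getD p 0 = t := hv _ hmem
    have hz : (d.modify p 0 (· - t)).getD p 0 = 0 := by rw [hself, hvt]; ring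
    simp only
    rw [if_pos hz, bSub_drop L p t hp hmem]
    have hc : d.contains p :=
      (PySem.Dict.contains_iff_mem_keys d p).mpr (hk.mem_iff.mpr (List.mem_map_of_mem hmem))
    have hkeys1 : (d.modify p 0 (· - t)).keys = d.keys := by
      rw [PySem.Dict.keys_modify, PySem.Dict.keys_insert_of_contains _ _ hc]
    refine ⟨?_, ?_, ?_⟩
    · rw [keys_erase_eq, hkeys1, map_fst_filter_ne]
      exact hk.filter _
    · intro e he
      have heL := List.mem_of_mem_filter he
      have hep : e.1 ≠ p := by simpa using List.of_mem_filter he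
      rw [getD_erase_of_ne _ _ _ hep, PySem.Dict.getD_modify, if_neg hep, hv e heL]
    · rw [map_fst_filter_ne]
      exact hp.sublist List.filter_sublist
  · -- no exact (p, t) entry: the new value is nonzero, a plain add of -t
    have hnz : ¬ (d.modify p 0 (· - t)).getD p 0 = 0 := by
      rw [hself, hgd]
      intro hh
      have hbt : bGet L p = t := by omega
      by_cases hm : p ∈ L.map Prod.fst
      · have hmm := mem_of_get d L hI p hm
        rw [hgd, hbt] at hmm
        exact hmem hmm
      · rw [bGet_not_mem L p hm] at hbt
        omega
    simp only
    rw [if_neg hnz, bSub_eq_bAdd L p t hmem,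
      show d.modify p 0 (· - t) = d.modify p 0 (· + (-t)) by simp [sub_eq_add_neg]]
    exact DInv_add d L hI p (-t)

-- the sell loops advance in lockstep: A walks the sorted key list mutating the dict,
-- B walks the same entries building the survivor list
theorem sell_corr (L : List (Int × Int)) : ∀ (d : PySem.Dict Int Int)
    (pre : List (Int × Int)) (c rev : Int),
    d.keys.Perm ((pre ++ L).map Prod.fst) →
    (∀ e ∈ pre ++ L, d.getD e.1 0 = e.2) →
    (((pre ++ L).map Prod.fst).Pairwise (· < ·)) →
    (aSellLoop (L.map Prod.fst) rev c d).1 = (bSellLoop L c rev pre).1 ∧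
      DInv (aSellLoop (L.map Prod.fst) rev c d).2 (bSellLoop L c rev pre).2 := by
  induction L with
  | nil =>
    intro d pre c rev hk hv hp
    simp only [List.map_nil, aSellLoop, bSellLoop]
    simp only [List.append_nil] at hk hv hp
    exact ⟨by trivial, hk, hv, hp⟩
  | cons e L' ih =>
    intro d pre c rev hk hv hp
    obtain ⟨p, q⟩ := e
    simp only [List.map_cons, aSellLoop, bSellLoop]
    by_cases hc : c = 0
    · rw [if_pos hc, if_pos hc]
      exact ⟨by trivial, hk, hv, hp⟩
    · rw [if_neg hc, if_neg hc]
      have hq : d.getD p 0 = q := hv (p, q) (by simp)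
      rw [hq]
      have hkeyfacts : (∀ e ∈ pre, e.1 < p) ∧ (∀ e ∈ L', p < e.1) := by
        rw [List.map_append, List.pairwise_append] at hp
        constructor
        · intro e he
          exact hp.2.2 _ (List.mem_map_of_mem he) p (by simp)
        · intro e he
          exact List.rel_of_pairwise_cons (by simpa using hp.2.1) (List.mem_map_of_mem he)
      have hcont : d.contains p :=
        (PySem.Dict.contains_iff_mem_keys d p).mpr (hk.mem_iff.mpr (by simp))
      have hkeys1 : (d.modify p 0 (· - min c q)).keys = d.keys := by
        rw [PySem.Dict.keys_modify, PySem.Dict.keys_insert_of_contains _ _ hcont]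
      have hselfv : (d.modify p 0 (· - min c q)).getD p 0 = q - min c q := by
        rw [PySem.Dict.getD_modify, if_pos rfl, hq]
      by_cases hz : q = min c q
      · -- entry exhausted: A erases the key, B omits the entry
        have hz' : (d.modify p 0 (· - min c q)).getD p 0 = 0 := by rw [hselfv]; omega
        rw [if_pos hz', if_pos hz]
        refine ih ((d.modify p 0 (· - min c q)).erase p) pre (c - min c q) (rev + min c q * p)
          ?_ ?_ ?_
        · rw [keys_erase_eq, hkeys1]
          refine (hk.filter _).trans (List.Perm.of_eq ?_)
          simp only [List.map_append, List.map_cons, List.filter_append, List.filter_cons]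
          rw [if_neg (by simp), List.filter_eq_self.mpr, List.filter_eq_self.mpr]
          · intro x hx
            obtain ⟨e, he, rfl⟩ := List.mem_map.mp hx
            simpa using ne_of_gt (hkeyfacts.2 e he)
          · intro x hx
            obtain ⟨e, he, rfl⟩ := List.mem_map.mp hx
            simpa using ne_of_lt (hkeyfacts.1 e he)
        · intro e he
          have hep : e.1 ≠ p := by
            rcases List.mem_append.mp he with h1 | h1
            · exact ne_of_lt (hkeyfacts.1 e h1)
            · exact ne_of_gt (hkeyfacts.2 e h1)
          rw [getD_erase_of_ne _ _ _ hep, PySem.Dict.getD_modify, if_neg hep]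
          exact hv e (by rcases List.mem_append.mp he with h1 | h1 <;> simp [h1])
        · rw [List.map_append, List.pairwise_append] at hp ⊢
          refine ⟨hp.1, (show List.Pairwise (· < ·) (p :: L'.map Prod.fst) by
            simpa using hp.2.1).of_cons, ?_⟩
          intro a ha b hb
          exact hp.2.2 a ha b (by simp [hb])
      · -- entry survives with q - min c q
        have hz' : ¬ (d.modify p 0 (· - min c q)).getD p 0 = 0 := by rw [hselfv]; omega
        rw [if_neg hz', if_neg hz]
        have hres := ih (d.modify p 0 (· - min c q)) (pre ++ [(p, q - min c q)]) (c - min c q)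
          (rev + min c q * p) ?_ ?_ ?_
        · simpa using hres
        · rw [hkeys1]
          refine hk.trans (List.Perm.of_eq ?_)
          simp
        · intro e he
          simp only [List.append_assoc, List.mem_append, List.mem_cons, List.mem_singleton,
            List.cons_append, List.nil_append, List.not_mem_nil, or_false] at he
          rcases he with h1 | h1 | h1
          · rw [PySem.Dict.getD_modify, if_neg (ne_of_lt (hkeyfacts.1 e h1))]
            exact hv e (by simp [h1])
          · rw [h1]
            exact hselfv
          · rw [PySem.Dict.getD_modify, if_neg (ne_of_gt (hkeyfacts.2 e h1))]
            exact hv e (by simp [h1])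
        · have heq : ((pre ++ [(p, q - min c q)] ++ L').map Prod.fst) =
              ((pre ++ (p, q) :: L').map Prod.fst) := by simp
          rw [heq]
          exact hp

theorem sorted_keys_eq (d : PySem.Dict Int Int) (L : List (Int × Int)) (hI : DInv d L) :
    PySem.List.sorted d.keys (fun k => k) = L.map Prod.fst :=
  PySem.List.sorted_eq_of_perm_of_pairwise_lt _ _ _ hI.1.symm hI.2.2

theorem DInv_sell (d : PySem.Dict Int Int) (L : List (Int × Int)) (hI : DInv d L) (c : Int) :
    (aSellLoop (PySem.List.sorted d.keys (fun k => k)) 0 c d).1 = (bSellLoop L c 0 []).1 ∧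
      DInv (aSellLoop (PySem.List.sorted d.keys (fun k => k)) 0 c d).2 (bSellLoop L c 0 []).2 := by
  rw [sorted_keys_eq d L hI]
  exact sell_corr L d [] c 0 (by simpa using hI.1) (by simpa using hI.2.1) (by simpa using hI.2.2)

theorem SInv_insert (A : PySem.Dict String (PySem.Dict Int Int))
    (B : PySem.Dict String (List (Int × Int))) (hS : SInv A B) (r : String)
    (X : PySem.Dict Int Int) (Y : List (Int × Int)) (hXY : DInv X Y) :
    SInv (A.insert r X) (B.insert r Y) := by
  intro r'
  rw [PySem.Dict.getD_insert, PySem.Dict.getD_insert]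
  by_cases h : r' = r
  · rw [if_pos h, if_pos h]
    exact hXY
  · rw [if_neg h, if_neg h]
    exact hS r'

theorem step_corr (log : List String) (res : List Int)
    (A : PySem.Dict String (PySem.Dict Int Int)) (B : PySem.Dict String (List (Int × Int)))
    (hS : SInv A B) :
    (aStep (res, A) log).1 = (bStep (res, B) log).1 ∧
      SInv (aStep (res, A) log).2 (bStep (res, B) log).2 := by
  match log with
  | [] => exact ⟨by trivial, hS⟩
  | op :: rest =>
    by_cases h1 : op = "supply"
    · subst h1
      simp only [aStep, bStep, if_pos rfl]
      match rest with
      | [r, c, p] =>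
        exact ⟨by trivial, SInv_insert A B hS r _ _ (DInv_add _ _ (hS r) (pvInt p) (pvInt c))⟩
      | [] => exact ⟨by trivial, hS⟩
      | [_] => exact ⟨by trivial, hS⟩
      | [_, _] => exact ⟨by trivial, hS⟩
      | _ :: _ :: _ :: _ :: _ => exact ⟨by trivial, hS⟩
    · by_cases h2 : op = "upgrade"
      · subst h2
        simp only [aStep, bStep, if_neg (by decide : ¬ ("upgrade" : String) = "supply"), if_pos rfl]
        match rest with
        | [r, c, o, n] =>
          simp only
          rw [getD_eq_bGet _ _ (hS r) (pvInt o)]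
          by_cases ht : min (pvInt c) (bGet (B.getD r []) (pvInt o)) ≠ 0
          · rw [if_pos ht, if_pos ht]
            refine ⟨by trivial, SInv_insert A B hS r _ _ ?_⟩
            exact DInv_add _ _ (DInv_sub _ _ (hS r) (pvInt o) _ (by simpa using ht)) (pvInt n) _
          · rw [if_neg ht, if_neg ht]
            exact ⟨by trivial, SInv_insert A B hS r _ _ (hS r)⟩
        | [] => exact ⟨by trivial, hS⟩
        | [_] => exact ⟨by trivial, hS⟩
        | [_, _] => exact ⟨by trivial, hS⟩
        | [_, _, _] => exact ⟨by trivial, hS⟩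
        | _ :: _ :: _ :: _ :: _ :: _ => exact ⟨by trivial, hS⟩
      · by_cases h3 : op = "sell"
        · subst h3
          simp only [aStep, bStep, if_neg (by decide : ¬ ("sell" : String) = "supply"),
            if_neg (by decide : ¬ ("sell" : String) = "upgrade"), if_pos rfl]
          match rest with
          | [r, c] =>
            simp only
            obtain ⟨hrev, hinv⟩ :=
              DInv_sell (A.getD r PySem.Dict.empty) (B.getD r []) (hS r) (pvInt c)
            exact ⟨by simp only [if_true]; rw [hrev], SInv_insert A B hS r _ _ hinv⟩
          | [] => exact ⟨by trivial, hS⟩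
          | [_] => exact ⟨by trivial, hS⟩
          | _ :: _ :: _ :: _ => exact ⟨by trivial, hS⟩
        · simp only [aStep, bStep, if_neg h1, if_neg h2, if_neg h3]
          exact ⟨by trivial, hS⟩

theorem fold_corr (logs : List (List String)) : ∀ (res : List Int)
    (A : PySem.Dict String (PySem.Dict Int Int)) (B : PySem.Dict String (List (Int × Int))),
    SInv A B →
    (logs.foldl aStep (res, A)).1 = (logs.foldl bStep (res, B)).1 := by
  induction logs with
  | nil =>
    intro res A B _
    rfl
  | cons log logs ih =>
    intro res A B hS
    obtain ⟨h1, h2⟩ := step_corr log res A B hS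
    simp only [List.foldl_cons]
    rw [show aStep (res, A) log = ((aStep (res, A) log).1, (aStep (res, A) log).2) from rfl,
      show bStep (res, B) log = ((bStep (res, B) log).1, (bStep (res, B) log).2) from rfl, h1]
    exact ih _ _ _ h2

theorem SInv_empty : SInv PySem.Dict.empty PySem.Dict.empty := by
  intro r
  simpa [PySem.Dict.getD_empty] using DInv_empty

-- ===== VERDICT (by name: the statement is the Claim_ definition above) =====
theorem process_logs_spec : Claim_equal_process_logs := by
  intro logs _ _
  unfold Spec_process_logs process_logs process_logs_alt
  exact fold_corr logs [] _ _ SInv_empty
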